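-- pv_equiv track=rewrite | github.com/Lyagoosh/Music-Lyrics-Fetcher | music_lyrics_gui.py | minimal_clean
-- ===== SOURCE A (Python) =====
-- def minimal_clean(text):
--     """Minimal text cleaning - preserve all spaces and structure"""
--     if not text:
--         return None
--
--     # Only remove extra spaces at line ends
--     lines = text.split('\n')
--     cleaned_lines = []
--
--     for line in lines:
--         # Remove spaces only at start and end of line
--         line = line.strip()
--         if line:
--             cleaned_lines.append(line)
--         else:
--             # Keep empty lines as separators
--             cleaned_lines.append('')
--
--     # Remove multiple empty lines at start and end
--     while cleaned_lines and not cleaned_lines[0]: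
--         cleaned_lines.pop(0)
--     while cleaned_lines and not cleaned_lines[-1]:
--         cleaned_lines.pop()
--
--     return '\n'.join(cleaned_lines)
-- ===== SOURCE B (Python) =====
-- def minimal_clean(text):
--     """Minimal text cleaning - preserve all spaces and structure"""
--     if not text:
--         return None
--     return '\n'.join(line.strip() for line in text.split('\n')).strip('\n')
-- ===== Notes on version B (the rewrite author's own statement) =====
-- stated objective: simpler
-- what changed: B replaces A's explicit accumulator loop plus two while-pop boundary loops with a one-liner: strip each split line, join them back with newlines, and strip newline characters from both ends of the joined string to drop leading/trailing blank lines.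
import Mathlib
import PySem

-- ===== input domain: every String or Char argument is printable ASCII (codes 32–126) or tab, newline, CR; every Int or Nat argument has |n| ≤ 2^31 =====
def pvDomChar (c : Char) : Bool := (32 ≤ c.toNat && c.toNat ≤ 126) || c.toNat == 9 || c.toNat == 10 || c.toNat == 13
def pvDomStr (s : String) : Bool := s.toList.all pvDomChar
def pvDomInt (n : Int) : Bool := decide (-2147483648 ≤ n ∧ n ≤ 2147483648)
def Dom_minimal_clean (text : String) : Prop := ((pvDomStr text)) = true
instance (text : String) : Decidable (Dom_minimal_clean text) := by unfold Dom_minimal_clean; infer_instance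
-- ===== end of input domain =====

-- B replaces A's two explicit while-pop boundary loops by a single `.strip('\n')` on the
-- joined string (objective: simpler decomposition); same return value everywhere.

-- ===== PORT A =====
-- while cleaned_lines and not cleaned_lines[0]: cleaned_lines.pop(0)
def pvPopFront : List (List Char) → List (List Char)
  | [] => []
  | l :: ls => if l = [] then pvPopFront ls else l :: ls

-- while cleaned_lines and not cleaned_lines[-1]: cleaned_lines.pop()
def pvPopBack : List (List Char) → List (List Char)
  | [] => []
  | l :: ls =>
    match pvPopBack ls with
    | [] => if l = [] then [] else [l]
    | ys => l :: ys

def minimal_clean (text : String) : Option String :=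
  if text = "" then none
  else
    let lines := PySem.Chars.splitOn text.toList ['\n']
    let cleaned := lines.foldl (fun acc line =>
      let line := PySem.Chars.strip line
      if line ≠ [] then acc ++ [line] else acc ++ [([] : List Char)]) []
    let cleaned := pvPopFront cleaned
    let cleaned := pvPopBack cleaned
    some (String.ofList (PySem.Chars.join ['\n'] cleaned))

-- ===== PORT B =====
def minimal_clean_alt (text : String) : Option String :=
  if text = "" then none
  else
    some (String.ofList (PySem.Chars.stripChars
      (PySem.Chars.join ['\n']
        ((PySem.Chars.splitOn text.toList ['\n']).map PySem.Chars.strip)) ['\n']))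

-- ===== PRECONDITION & SPEC =====
def Spec_minimal_clean (text : String) (out : Option String) : Prop := out = minimal_clean_alt text
instance (text : String) (out : Option String) : Decidable (Spec_minimal_clean text out) := by unfold Spec_minimal_clean; infer_instance

-- ===== CLAIM (what is proved, stated in full; the proofs are below) =====
def Claim_equal_minimal_clean : Prop := ∀ (text : String), Dom_minimal_clean text → Spec_minimal_clean text (minimal_clean text)

-- ===== LEMMAS AND PROOFS =====

-- a nonempty boundary line of A's cleaned list never starts or ends with '\n'
def pvOK (l : List Char) : Prop :=
  (∀ a, l.head? = some a → a ≠ '\n') ∧ (∀ a, l.getLast? = some a → a ≠ '\n')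

theorem pv_head_dropWhile {p : Char → Bool} {l : List Char} {a : Char}
    (h : (l.dropWhile p).head? = some a) : p a = false := by
  have hne : l.dropWhile p ≠ [] := by intro h0; simp [h0] at h
  have h2 := List.head_dropWhile_not p (l := l) hne
  rw [List.head?_eq_some_head hne, Option.some_inj] at h
  rw [h] at h2
  simpa using h2

theorem pv_getLast_dropWhile {p : Char → Bool} {l : List Char} {a : Char}
    (h : (l.dropWhile p).getLast? = some a) : l.getLast? = some a := by
  have hne : l.dropWhile p ≠ [] := by intro h0; simp [h0] at h
  obtain ⟨t, ht⟩ := List.dropWhile_suffix (l := l) p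
  rw [← ht, List.getLast?_append, h]
  rfl

theorem pv_head_strip {s : List Char} {a : Char}
    (h : (PySem.Chars.strip s).head? = some a) : PySem.Chars.isspace a = false := by
  simp only [PySem.Chars.strip, PySem.Chars.rstrip, PySem.Chars.lstrip] at h
  rw [List.head?_reverse] at h
  have h2 := pv_getLast_dropWhile h
  rw [List.getLast?_reverse] at h2
  exact pv_head_dropWhile h2

theorem pv_getLast_strip {s : List Char} {a : Char}
    (h : (PySem.Chars.strip s).getLast? = some a) : PySem.Chars.isspace a = false := by
  simp only [PySem.Chars.strip, PySem.Chars.rstrip, PySem.Chars.lstrip] at h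
  rw [List.getLast?_reverse] at h
  exact pv_head_dropWhile h

theorem pvOK_strip (s : List Char) : pvOK (PySem.Chars.strip s) := by
  constructor
  · intro a ha hEq
    have := pv_head_strip ha
    subst hEq
    simp [PySem.Chars.isspace] at this
  · intro a ha hEq
    have := pv_getLast_strip ha
    subst hEq
    simp [PySem.Chars.isspace] at this

theorem pv_front (ls : List (List Char)) (hOK : ∀ l ∈ ls, pvOK l) :
    (PySem.Chars.join ['\n'] ls).dropWhile (fun c => (['\n'] : List Char).contains c)
      = PySem.Chars.join ['\n'] (pvPopFront ls) := by
  induction ls with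
  | nil => rw [PySem.Chars.join_nil]; rfl
  | cons l ls ih =>
    by_cases hl : l = []
    · subst hl
      cases ls with
      | nil =>
        rw [PySem.Chars.join_singleton]
        simp [pvPopFront, PySem.Chars.join_nil]
      | cons m ms =>
        rw [PySem.Chars.join_cons_cons]
        simp only [pvPopFront, List.nil_append]
        rw [show (['\n'] : List Char) ++ PySem.Chars.join ['\n'] (m :: ms)
              = '\n' :: PySem.Chars.join ['\n'] (m :: ms) from rfl]
        rw [List.dropWhile_cons_of_pos (by decide)]
        exact ih (fun x hx => hOK x (List.mem_cons_of_mem _ hx))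
    · obtain ⟨a, as, rfl⟩ := List.exists_cons_of_ne_nil hl
      have hOKl : a ≠ '\n' := (hOK _ List.mem_cons_self).1 a rfl
      have hp : (fun c => (['\n'] : List Char).contains c) a = false := by simpa using hOKl
      simp only [pvPopFront, if_neg hl]
      cases ls with
      | nil =>
        rw [PySem.Chars.join_singleton, List.dropWhile_cons_of_neg (by simpa using hOKl)]
      | cons m ms =>
        rw [PySem.Chars.join_cons_cons, List.cons_append, List.cons_append,
          List.dropWhile_cons_of_neg (by simpa using hOKl)]


theorem pv_join_append_singleton (xs : List (List Char)) (v : List Char) (hxs : xs ≠ []) :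
    PySem.Chars.join ['\n'] (xs ++ [v]) = PySem.Chars.join ['\n'] xs ++ '\n' :: v := by
  induction xs with
  | nil => exact absurd rfl hxs
  | cons x xs ih =>
    cases xs with
    | nil =>
      rw [List.cons_append, List.nil_append, PySem.Chars.join_cons_cons,
        PySem.Chars.join_singleton, PySem.Chars.join_singleton]
      simp
    | cons y ys =>
      have ih' := ih (by simp)
      rw [List.cons_append] at ih'
      simp only [List.cons_append]
      rw [PySem.Chars.join_cons_cons, PySem.Chars.join_cons_cons, ih']
      simp

theorem pv_join_reverse (ls : List (List Char)) :
    (PySem.Chars.join ['\n'] ls).reverse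
      = PySem.Chars.join ['\n'] ((ls.map List.reverse).reverse) := by
  induction ls with
  | nil => rw [PySem.Chars.join_nil]; rfl
  | cons l ls ih =>
    cases ls with
    | nil => simp [PySem.Chars.join_singleton]
    | cons m ms =>
      rw [PySem.Chars.join_cons_cons, List.reverse_append, List.reverse_append, ih,
        show (List.map List.reverse (l :: m :: ms)).reverse
          = (List.map List.reverse (m :: ms)).reverse ++ [l.reverse] from by simp,
        pv_join_append_singleton _ _ (by simp)]
      simp

theorem pv_popFront_map_reverse (ls : List (List Char)) :
    pvPopFront (ls.map List.reverse) = (pvPopFront ls).map List.reverse := by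
  induction ls with
  | nil => rfl
  | cons l ls ih =>
    by_cases hl : l = []
    · subst hl; simpa [pvPopFront] using ih
    · simp [pvPopFront, List.reverse_eq_nil_iff, hl]

theorem pv_popFront_append_singleton (xs : List (List Char)) (l : List Char) :
    pvPopFront (xs ++ [l]) =
      match pvPopFront xs with
      | [] => if l = [] then [] else [l]
      | ys => ys ++ [l] := by
  induction xs with
  | nil => simp [pvPopFront]
  | cons x xs ih =>
    by_cases hx : x = []
    · subst hx; simpa [pvPopFront] using ih
    · simp [pvPopFront, hx]

theorem pv_popBack_eq (ls : List (List Char)) :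
    pvPopBack ls = (pvPopFront ls.reverse).reverse := by
  induction ls with
  | nil => rfl
  | cons l ls ih =>
    rw [List.reverse_cons, pv_popFront_append_singleton]
    show (match pvPopBack ls with
      | [] => if l = [] then [] else [l]
      | ys => l :: ys) = _
    rw [ih]
    rcases hx : pvPopFront ls.reverse with _ | ⟨y, ys⟩
    · split_ifs <;> simp
    · simp

theorem pvOK_mem_popFront {ls : List (List Char)} (h : ∀ l ∈ ls, pvOK l) :
    ∀ l ∈ pvPopFront ls, pvOK l := by
  induction ls with
  | nil => simp [pvPopFront]
  | cons x xs ih =>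
    by_cases hx : x = []
    · subst hx
      simpa [pvPopFront] using ih (fun l hl => h l (List.mem_cons_of_mem _ hl))
    · simpa [pvPopFront, hx] using h

theorem pv_OK_reverse {l : List Char} (h : pvOK l) : pvOK l.reverse := by
  constructor
  · intro a ha; rw [List.head?_reverse] at ha; exact h.2 a ha
  · intro a ha; rw [List.getLast?_reverse] at ha; exact h.1 a ha

theorem pv_stripChars_join (ls : List (List Char)) (hOK : ∀ l ∈ ls, pvOK l) :
    PySem.Chars.stripChars (PySem.Chars.join ['\n'] ls) ['\n']
      = PySem.Chars.join ['\n'] (pvPopBack (pvPopFront ls)) := by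
  have hK : ∀ l ∈ pvPopFront ls, pvOK l := pvOK_mem_popFront hOK
  have hKrev : ∀ l ∈ (((pvPopFront ls).map List.reverse).reverse), pvOK l := by
    intro l hl
    rw [List.mem_reverse, List.mem_map] at hl
    obtain ⟨x, hx, rfl⟩ := hl
    exact pv_OK_reverse (hK x hx)
  simp only [PySem.Chars.stripChars]
  rw [pv_front ls hOK, pv_join_reverse, pv_front _ hKrev, pv_join_reverse,
    show ((pvPopFront ls).map List.reverse).reverse
      = (pvPopFront ls).reverse.map List.reverse from by rw [List.map_reverse],
    pv_popFront_map_reverse, pv_popBack_eq]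
  simp

-- ===== VERDICT (by name: the statement is the Claim_ definition above) =====
theorem minimal_clean_spec : Claim_equal_minimal_clean := by
  intro text _
  unfold Spec_minimal_clean minimal_clean minimal_clean_alt
  by_cases h : text = ""
  · simp [h]
  · simp only [h, ite_false]
    set lines := PySem.Chars.splitOn text.toList ['\n'] with hl
    have hfold : lines.foldl (fun acc line =>
        let line := PySem.Chars.strip line
        if line ≠ [] then acc ++ [line] else acc ++ [([] : List Char)]) []
        = lines.map PySem.Chars.strip := by
      have : (fun (acc : List (List Char)) line =>
          let line := PySem.Chars.strip line
          if line ≠ [] then acc ++ [line] else acc ++ [([] : List Char)])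
          = fun acc line => acc ++ [PySem.Chars.strip line] := by
        funext acc line
        by_cases hc : PySem.Chars.strip line = [] <;> simp [hc]
      rw [this, PySem.List.foldl_append_singleton_eq_map]
      simp
    rw [hfold, pv_stripChars_join _ (by intro l hmem; obtain ⟨x, _, rfl⟩ := List.mem_map.mp hmem; exact pvOK_strip x)]
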